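-- pv_equiv track=rewrite | github.com/pwborthwick/harpy | source/fci.py | bResidues
-- ===== SOURCE A (Python) =====
-- def bResidues(da, spinOrbitals):
--     #get the residues of determinant da
--
--     residues = []
--     occupancy = bin(da).count('1')
--
--     for i in range(spinOrbitals):
--         mask1 = 1 << i
--         for j in range(i):
--             mask2 = 1 << j
--             reducedOccupancy = da & ~(mask1 ^ mask2)
--
--             if bin(reducedOccupancy).count('1') == (occupancy - 2):
--                 residues.append(reducedOccupancy)
--
--     return residues
-- ===== SOURCE B (Python) =====
-- def bResidues(da, spinOrbitals):
--     # Extract the set-bit positions below spinOrbitals once, then emit one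
--     # residue per ordered pair of set bits (outer bit ascending, inner below it).
--     bits = []
--     d = da
--     i = 0
--     while d and i < spinOrbitals:
--         if d & 1:
--             bits.append(i)
--         d >>= 1
--         i += 1
--     return [da & ~((1 << i) | (1 << j)) for i in bits for j in bits if j < i]
-- ===== Notes on version B (the rewrite author's own statement) =====
-- stated objective: faster
-- what changed: A scans all O(spinOrbitals^2) index pairs and popcount-tests each masked value; B extracts the set-bit positions below spinOrbitals once and emits one residue per ordered pair of set bits, removing the popcount test entirely.
-- outside the precondition, e.g. on bResidues(-7, 7): A returns [-8, -8, -16], B returns [-16, -24, -31, -40, -47, -55, -72, -79, -87, -103]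
import Mathlib
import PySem

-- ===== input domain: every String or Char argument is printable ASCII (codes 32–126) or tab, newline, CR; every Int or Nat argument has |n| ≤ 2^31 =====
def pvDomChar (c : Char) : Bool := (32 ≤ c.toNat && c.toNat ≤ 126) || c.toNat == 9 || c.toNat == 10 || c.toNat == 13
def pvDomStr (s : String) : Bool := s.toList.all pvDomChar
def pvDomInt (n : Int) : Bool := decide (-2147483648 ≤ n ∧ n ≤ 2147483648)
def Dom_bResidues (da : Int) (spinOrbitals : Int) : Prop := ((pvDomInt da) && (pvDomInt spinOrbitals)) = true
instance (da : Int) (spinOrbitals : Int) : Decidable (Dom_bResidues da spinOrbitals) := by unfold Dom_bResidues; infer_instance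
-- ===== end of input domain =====

-- B replaces A's scan over all O(spinOrbitals^2) index pairs by extracting the set-bit
-- positions once and iterating only pairs of set bits (objective: faster).

-- ===== PORT A =====
-- bin(x).count('1') is Python's popcount of |x|, ported as PySem.Int.bitCount (Python-exact, also on negatives).
def bResidues (da : Int) (spinOrbitals : Int) : List Int :=
  let occupancy : Int := (PySem.Int.bitCount da : Int)
  (PySem.List.pyRange 0 spinOrbitals).foldl (fun residues i =>
    let mask1 : Int := 1 <<< i.toNat
    (PySem.List.pyRange 0 i).foldl (fun residues j =>
      let mask2 : Int := 1 <<< j.toNat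
      let reducedOccupancy : Int := PySem.Int.band da (Int.not (PySem.Int.bxor mask1 mask2))
      if (PySem.Int.bitCount reducedOccupancy : Int) = occupancy - 2
      then residues ++ [reducedOccupancy] else residues) residues) []

-- ===== PORT B =====
-- the 'while d and i < spinOrbitals' loop of Source B collecting set-bit positions
def collectBits (d : Int) (i : Int) (spinOrbitals : Int) : List Int :=
  if _h : d ≠ 0 ∧ i < spinOrbitals then
    (if PySem.Int.band d 1 ≠ 0 then [i] else []) ++ collectBits (d >>> 1) (i + 1) spinOrbitals
  else []
termination_by (spinOrbitals - i).toNat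
decreasing_by omega

def bResidues_alt (da : Int) (spinOrbitals : Int) : List Int :=
  let bits := collectBits da 0 spinOrbitals
  bits.flatMap (fun i => (bits.filter (fun j => j < i)).map (fun j =>
    PySem.Int.band da (Int.not (PySem.Int.bor (1 <<< i.toNat) (1 <<< j.toNat)))))

-- ===== PRECONDITION & SPEC =====
-- Pre_ excludes negative da, on which A's comparison of bin(x).count('1') (a popcount of |x|)
-- against occupancy-2 fires accidentally and yields artefact lists with duplicates; a
-- determinant occupancy bitstring is nonnegative, so B does not reproduce that behaviour.
def Pre_bResidues (da : Int) (spinOrbitals : Int) : Prop := 0 ≤ da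
instance (da : Int) (spinOrbitals : Int) : Decidable (Pre_bResidues da spinOrbitals) := by unfold Pre_bResidues; infer_instance
def pvWitness_bResidues : Int × Int := (22, 5)
def Spec_bResidues (da : Int) (spinOrbitals : Int) (out : List Int) : Prop := out = bResidues_alt da spinOrbitals
instance (da : Int) (spinOrbitals : Int) (out : List Int) : Decidable (Spec_bResidues da spinOrbitals out) := by unfold Spec_bResidues; infer_instance

-- ===== CLAIM (what is proved, stated in full; the proofs are below) =====
def Claim_equal_bResidues : Prop := ∀ (da : Int) (spinOrbitals : Int), Dom_bResidues da spinOrbitals → Pre_bResidues da spinOrbitals → Spec_bResidues da spinOrbitals (bResidues da spinOrbitals)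

-- ===== LEMMAS AND PROOFS =====

-- popcount of a natural number, through PySem.Int.bitCount
def pcN (n : Nat) : Nat := PySem.Int.bitCount (n : Int)

theorem pcN_zero : pcN 0 = 0 := PySem.Int.bitCount_zero

theorem pcN_succ (m : Nat) (h : 0 < m) : pcN m = m % 2 + pcN (m / 2) :=
  PySem.Int.bitCount_natCast h

theorem testBit_ge (n i : Nat) (h : n.testBit i = true) : 2 ^ i ≤ n :=
  Nat.ge_two_pow_of_testBit h

theorem pcN_two_pow (k : Nat) : pcN (2 ^ k) = 1 := by
  induction k with
  | zero => simp [pcN]; decide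
  | succ k ih =>
      have h2 : 0 < 2 ^ (k + 1) := Nat.two_pow_pos _
      rw [pcN_succ _ h2]
      have e0 : 2 ^ (k + 1) % 2 = 0 := by simp [pow_succ, Nat.mul_mod_left]
      have h3 : 2 ^ (k + 1) / 2 = 2 ^ k := by simp [pow_succ]
      rw [e0, h3, ih]

theorem pc_sub_pow (i : Nat) : ∀ n : Nat, n.testBit i = true → pcN (n - 2 ^ i) + 1 = pcN n := by
  induction i with
  | zero =>
      intro n h
      rw [Nat.testBit_zero] at h
      have hodd : n % 2 = 1 := by simpa using h
      have hn : 0 < n := by omega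
      rw [pcN_succ n hn]
      simp only [pow_zero]
      rcases Nat.lt_or_ge 1 n with h1 | h1
      · have hpos : 0 < n - 1 := by omega
        rw [pcN_succ _ hpos]
        have e1 : (n - 1) % 2 = 0 := by omega
        have e2 : (n - 1) / 2 = n / 2 := by omega
        rw [e1, e2]; omega
      · have hn1 : n = 1 := by omega
        subst hn1
        simp [pcN_zero]
  | succ i ih =>
      intro n h
      rw [Nat.testBit_add_one] at h
      have hge : 2 ^ i ≤ n / 2 := testBit_ge _ _ h
      have hp : 2 ^ (i + 1) = 2 * 2 ^ i := by ring
      have hge' : 2 * 2 ^ i ≤ n := by omega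
      have hn : 0 < n := by have := Nat.two_pow_pos i; omega
      rw [hp]
      rcases Nat.lt_or_ge (2 * 2 ^ i) n with h1 | h1
      · have hpos : 0 < n - 2 * 2 ^ i := by omega
        rw [pcN_succ _ hpos, pcN_succ n hn]
        have e1 : (n - 2 * 2 ^ i) % 2 = n % 2 := by omega
        have e2 : (n - 2 * 2 ^ i) / 2 = n / 2 - 2 ^ i := by omega
        rw [e1, e2]
        have := ih (n / 2) h
        omega
      · have hn1 : n = 2 * 2 ^ i := by omega
        subst hn1
        have : (2 : Nat) * 2 ^ i = 2 ^ (i + 1) := by ring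
        rw [this]
        simp [pcN_two_pow, pcN_zero]

theorem testBit_sub_pow (i : Nat) : ∀ (n k : Nat), n.testBit i = true → k ≠ i →
    (n - 2 ^ i).testBit k = n.testBit k := by
  induction i with
  | zero =>
      intro n k h hk
      rw [Nat.testBit_zero] at h
      have hodd : n % 2 = 1 := by simpa using h
      obtain ⟨k', rfl⟩ : ∃ k', k = k' + 1 := ⟨k - 1, by omega⟩
      rw [Nat.testBit_add_one, Nat.testBit_add_one]
      have : (n - 2 ^ 0) / 2 = n / 2 := by simp only [pow_zero]; omega
      rw [this]
  | succ i ih =>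
      intro n k h hk
      rw [Nat.testBit_add_one] at h
      have hge : 2 ^ i ≤ n / 2 := testBit_ge _ _ h
      have hp : 2 ^ (i + 1) = 2 * 2 ^ i := by ring
      have hge' : 2 * 2 ^ i ≤ n := by omega
      cases k with
      | zero =>
          rw [Nat.testBit_zero, Nat.testBit_zero, hp]
          have : (n - 2 * 2 ^ i) % 2 = n % 2 := by omega
          rw [this]
      | succ k' =>
          rw [Nat.testBit_add_one, Nat.testBit_add_one, hp]
          have e2 : (n - 2 * 2 ^ i) / 2 = n / 2 - 2 ^ i := by omega
          rw [e2]
          exact ih (n / 2) k' h (by omega)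

theorem or_two_pow (i j : Nat) (h : j < i) : 2 ^ i ||| 2 ^ j = 2 ^ i + 2 ^ j := by
  apply Nat.eq_of_testBit_eq
  intro k
  rcases Nat.lt_trichotomy k i with hk | hk | hk
  · have hik : i ≠ k := by omega
    simp [Nat.testBit_two_pow_add_gt hk, Nat.testBit_or, Nat.testBit_two_pow, hik]
  · subst hk
    have hjk : j ≠ k := by omega
    simp [Nat.testBit_two_pow_add_eq, Nat.testBit_or, hjk]
  · have h1 : 2 ^ i + 2 ^ j < 2 ^ k := by
      have h2 : 2 ^ (i+1) ≤ 2 ^ k := Nat.pow_le_pow_right (by norm_num) hk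
      have h3 : 2 ^ j < 2 ^ i := Nat.pow_lt_pow_right (by norm_num) h
      rw [pow_succ] at h2; omega
    have hik : i ≠ k := by omega
    have hjk : j ≠ k := by omega
    simp [Nat.testBit_lt_two_pow h1, Nat.testBit_or, hik, hjk]

theorem xor_eq_or_two_pow (i j : Nat) (h : j ≠ i) : 2 ^ i ^^^ 2 ^ j = 2 ^ i ||| 2 ^ j := by
  apply Nat.eq_of_testBit_eq
  intro k
  simp only [Nat.testBit_xor, Nat.testBit_or, Nat.testBit_two_pow]
  by_cases hik : i = k <;> by_cases hjk : j = k <;> simp_all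

theorem and_mask (n i j : Nat) (h : j < i) :
    n &&& (2 ^ i ||| 2 ^ j) = (n.testBit i).toNat * 2 ^ i + (n.testBit j).toNat * 2 ^ j := by
  rw [Nat.and_or_distrib_left, Nat.and_two_pow, Nat.and_two_pow]
  cases hbi : n.testBit i <;> cases hbj : n.testBit j <;>
    simp [or_two_pow i j h]

-- the appended value, on the natural-number side
def valN (n i j : Nat) : Int := ((n - (n &&& (2 ^ i ||| 2 ^ j)) : Nat) : Int)

theorem cond_iff (n i j : Nat) (h : j < i) :
    ((pcN (n - (n &&& (2 ^ i ||| 2 ^ j))) : Int) = (pcN n : Int) - 2) ↔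
      (n.testBit i = true ∧ n.testBit j = true) := by
  rw [and_mask n i j h]
  have hij : j ≠ i := by omega
  cases hbi : n.testBit i <;> cases hbj : n.testBit j
  · simp only [Bool.toNat_false, Nat.zero_mul, Nat.add_zero, Nat.sub_zero]
    constructor
    · intro hc; omega
    · rintro ⟨h1, -⟩; cases h1
  · simp only [Bool.toNat_false, Bool.toNat_true, Nat.zero_mul, Nat.one_mul, Nat.zero_add]
    have := pc_sub_pow j n hbj
    constructor
    · intro hc; omega
    · rintro ⟨h1, -⟩; cases h1
  · simp only [Bool.toNat_false, Bool.toNat_true, Nat.zero_mul, Nat.one_mul, Nat.add_zero]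
    have := pc_sub_pow i n hbi
    constructor
    · intro hc; omega
    · rintro ⟨-, h1⟩; cases h1
  · simp only [Bool.toNat_true, Nat.one_mul]
    have h1 := pc_sub_pow i n hbi
    have h2 : (n - 2 ^ i).testBit j = true := by
      rw [testBit_sub_pow i n j hbi hij]; exact hbj
    have h3 := pc_sub_pow j (n - 2 ^ i) h2
    have h4 : 2 ^ i ≤ n := testBit_ge n i hbi
    have h5 : 2 ^ j ≤ n - 2 ^ i := testBit_ge _ j h2
    have e : n - (2 ^ i + 2 ^ j) = n - 2 ^ i - 2 ^ j := by omega
    rw [e]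
    constructor
    · intro _; simp
    · intro _; omega

theorem band_not_natCast (n m : Nat) :
    PySem.Int.band (n : Int) (Int.not (m : Int)) = ((n - (n &&& m) : Nat) : Int) := by
  simp [PySem.Int.band, Int.not]

theorem shiftRight_one_natCast (m : Nat) : ((m : Int) >>> (1 : Int)) = ((m / 2 : Nat) : Int) := by
  have h : ((m : Int) >>> (1 : Int)) = (m : Int) >>> (1 : Nat) := rfl
  rw [h, Int.shiftRight_eq_div_pow]
  norm_num

theorem collect_eq (s : Int) : ∀ (t : Nat) (m : Nat) (i0 : Int), (s - i0).toNat = t →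
    collectBits (m : Int) i0 s =
      ((List.range t).filter (fun j => m.testBit j)).map (fun (j : Nat) => i0 + (j : Int)) := by
  intro t
  induction t with
  | zero =>
      intro m i0 ht
      rw [collectBits]
      have : ¬ ((m : Int) ≠ 0 ∧ i0 < s) := by
        rintro ⟨-, h2⟩; omega
      rw [dif_neg this]
      simp
  | succ t ih =>
      intro m i0 ht
      rw [collectBits]
      by_cases hm : (m : Int) ≠ 0 ∧ i0 < s
      · have hband : PySem.Int.band (m : Int) 1 = ((m &&& 1 : Nat) : Int) := by
          have h1 : (1 : Int) = ((1 : Nat) : Int) := rfl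
          rw [h1, PySem.Int.band_natCast]
        have hm1 : m &&& 1 = (m.testBit 0).toNat := by
          have := Nat.and_two_pow m 0
          simpa using this
        have hcv : (if PySem.Int.band (m : Int) 1 ≠ 0 then [i0] else ([] : List Int)) =
            (if m.testBit 0 then [i0] else []) := by
          rw [hband, hm1]; cases hb : m.testBit 0 <;> simp
        have htail : List.map (fun (j : Nat) => i0 + (j : Int))
              ((List.map Nat.succ (List.range t)).filter (fun j => m.testBit j)) =
            List.map (fun (j : Nat) => (i0 + 1) + (j : Int))
              ((List.range t).filter (fun j => (m / 2).testBit j)) := by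
          rw [List.filter_map, List.map_map]
          have hc : ((fun j => m.testBit j) ∘ Nat.succ) = fun j => (m / 2).testBit j := by
            funext j
            simp [Function.comp, Nat.testBit_add_one]
          rw [hc]
          apply List.map_congr_left
          intro a _
          simp only [Function.comp_apply]
          push_cast
          ring
        rw [dif_pos hm, shiftRight_one_natCast, ih (m / 2) (i0 + 1) (by omega), hcv,
          List.range_succ_eq_map, List.filter_cons]
        cases hb : m.testBit 0
        · simp only [Bool.false_eq_true, if_false, List.nil_append]
          rw [htail]
        · simp only [if_true, List.map_cons, List.singleton_append]
          rw [htail]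
          norm_num
      · rw [dif_neg hm]
        have h0 : m = 0 := by
          rcases not_and_or.mp hm with h | h
          · simpa using h
          · omega
        subst h0
        simp [Nat.zero_testBit]

theorem flatMap_filter_of_nil {α β : Type} (p : α → Bool) (g : α → List β) :
    ∀ (l : List α), (∀ x ∈ l, p x = false → g x = []) →
      l.flatMap g = (l.filter p).flatMap g := by
  intro l
  induction l with
  | nil => intro _; rfl
  | cons x t ih =>
      intro hx
      rw [List.flatMap_cons, List.filter_cons]
      cases hpx : p x
      · rw [hx x (by simp) hpx]
        simpa using ih (fun y hy h' => hx y (by simp [hy]) h')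
      · rw [if_pos rfl, List.flatMap_cons]
        rw [ih (fun y hy h' => hx y (by simp [hy]) h')]

theorem filter_lt_range (S i : Nat) (h : i ≤ S) :
    (List.range S).filter (fun j => decide (j < i)) = List.range i := by
  have hS : S = i + (S - i) := by omega
  rw [hS, List.range_add, List.filter_append]
  have h1 : (List.range i).filter (fun j => decide (j < i)) = List.range i := by
    rw [List.filter_eq_self]
    intro a ha
    simp [List.mem_range] at ha ⊢
    omega
  have h2 : ((List.range (S - i)).map (fun x => i + x)).filter (fun j => decide (j < i)) = [] := by
    rw [List.filter_eq_nil_iff]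
    intro a ha
    simp [List.mem_map] at ha ⊢
    omega
  rw [h1, h2, List.append_nil]

theorem bResidues_A (n : Nat) (s : Int) :
    bResidues (n : Int) s = (List.range s.toNat).flatMap (fun i =>
      ((List.range i).filter (fun j =>
        decide ((pcN (n - (n &&& (2 ^ i ^^^ 2 ^ j))) : Int) = (pcN n : Int) - 2))).map
        (fun j => ((n - (n &&& (2 ^ i ^^^ 2 ^ j)) : Nat) : Int))) := by
  unfold bResidues
  simp only [PySem.List.foldl_append_ite, PySem.List.foldl_append_eq_flatMap, List.nil_append,
    PySem.List.pyRange_zero, List.flatMap_map, List.filter_map,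
    List.map_map, Int.toNat_natCast, Nat.one_shiftLeft, PySem.Int.bxor_natCast,
    band_not_natCast, pcN, Function.comp_def]
  rfl

theorem bResidues_B (n : Nat) (s : Int) :
    bResidues_alt (n : Int) s = ((List.range s.toNat).filter (fun i => n.testBit i)).flatMap (fun i =>
      (((List.range s.toNat).filter (fun j => n.testBit j)).filter (fun j => decide (j < i))).map
        (fun j => ((n - (n &&& (2 ^ i ||| 2 ^ j)) : Nat) : Int))) := by
  unfold bResidues_alt
  rw [collect_eq s s.toNat n 0 (by omega), List.flatMap_map]
  simp only [zero_add, List.filter_map, List.map_map, Function.comp_def, Int.toNat_natCast,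
    Nat.one_shiftLeft, PySem.Int.bor_natCast, band_not_natCast, Nat.cast_lt]

theorem flatMap_congr_mem {α β : Type} (l : List α) (f g : α → List β)
    (h : ∀ x ∈ l, f x = g x) : l.flatMap f = l.flatMap g := by
  induction l with
  | nil => rfl
  | cons x t ih =>
      rw [List.flatMap_cons, List.flatMap_cons, h x (by simp),
        ih (fun y hy => h y (by simp [hy]))]

theorem bResidues_eq (n : Nat) (s : Int) :
    bResidues (n : Int) s = bResidues_alt (n : Int) s := by
  rw [bResidues_A, bResidues_B]
  have hA : ∀ i : Nat, ((List.range i).filter (fun j =>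
        decide ((pcN (n - (n &&& (2 ^ i ^^^ 2 ^ j))) : Int) = (pcN n : Int) - 2))).map
        (fun j => ((n - (n &&& (2 ^ i ^^^ 2 ^ j)) : Nat) : Int))
      = ((List.range i).filter (fun j => n.testBit i && n.testBit j)).map
        (fun j => ((n - (n &&& (2 ^ i ||| 2 ^ j)) : Nat) : Int)) := by
    intro i
    have hf : (List.range i).filter (fun j =>
          decide ((pcN (n - (n &&& (2 ^ i ^^^ 2 ^ j))) : Int) = (pcN n : Int) - 2))
        = (List.range i).filter (fun j => n.testBit i && n.testBit j) := by
      apply List.filter_congr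
      intro j hj
      have hji : j < i := List.mem_range.mp hj
      rw [xor_eq_or_two_pow i j (by omega)]
      simp only [cond_iff n i j hji, Bool.decide_and, Bool.decide_eq_true]
    rw [hf]
    apply List.map_congr_left
    intro j hj
    have hji : j < i := List.mem_range.mp (List.mem_of_mem_filter hj)
    rw [xor_eq_or_two_pow i j (by omega)]
  simp only [hA]
  rw [flatMap_filter_of_nil (fun i => n.testBit i)]
  · apply flatMap_congr_mem
    intro i hi
    have hiS : i < s.toNat := List.mem_range.mp (List.mem_of_mem_filter hi)
    have hti : n.testBit i = true := List.of_mem_filter hi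
    have h1 : ((List.range s.toNat).filter (fun j => n.testBit j)).filter
          (fun j => decide (j < i))
        = (List.range i).filter (fun j => n.testBit j) := by
      rw [List.filter_filter]
      have hcomm : (List.range s.toNat).filter (fun a => decide (a < i) && n.testBit a)
          = (List.range s.toNat).filter (fun a => n.testBit a && decide (a < i)) := by
        apply List.filter_congr
        intro x _
        rw [Bool.and_comm]
      rw [hcomm, ← List.filter_filter, filter_lt_range s.toNat i (by omega)]
    rw [h1]
    have h3 : (List.range i).filter (fun j => n.testBit i && n.testBit j)
        = (List.range i).filter (fun j => n.testBit j) := by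
      apply List.filter_congr
      intro x _
      rw [hti, Bool.true_and]
    rw [h3]
  · intro i _ hfalse
    rw [List.map_eq_nil_iff, List.filter_eq_nil_iff]
    intro a _
    rw [hfalse]
    simp

-- ===== VERDICT (by name: the statement is the Claim_ definition above) =====
theorem bResidues_spec : Claim_equal_bResidues := by
  intro da s _hD hP
  have h0 : (0:Int) ≤ da := hP
  have : da = ((da.toNat : Nat) : Int) := by omega
  rw [this]
  exact bResidues_eq da.toNat s
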